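-- pv_equiv track=rewrite | github.com/ChahelPaatur/Self-Modifying-Program-Synthesis-via-Online-Library-Evolution | common/advanced_ops.py | hollow_out
-- ===== SOURCE A (Python) =====
-- from typing import List, Dict, Set, Tuple, Optional, Callable
--
-- Grid = List[List[int]]
--
-- def hollow_out(grid: Grid, bg: int = 0) -> Grid:
--     """Keep only the border of objects"""
--     if not grid or len(grid) < 3:
--         return grid
--
--     result = [row[:] for row in grid]
--     h, w = len(grid), len(grid[0])
--
--     for r in range(1, h - 1):
--         for c in range(1, w - 1):
--             if grid[r][c] != bg:
--                 # Check if surrounded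
--                 if all(grid[r+dr][c+dc] == grid[r][c]
--                        for dr, dc in [(-1,0), (1,0), (0,-1), (0,1)]):
--                     result[r][c] = bg
--
--     return result
-- ===== SOURCE B (Python) =====
-- def hollow_out(grid, bg=0):
--     """Keep only the border of objects (mask + four directional passes)."""
--     if not grid or len(grid) < 3:
--         return grid
--
--     h, w = len(grid), len(grid[0])
--     # candidate mask: interior cells whose value differs from bg
--     mask = [[0 < r < h - 1 and 0 < c < w - 1 and grid[r][c] != bg
--              for c in range(w)] for r in range(h)]
--     # four directional passes: un-mark a candidate whose neighbour differs
--     for dr, dc in ((-1, 0), (1, 0), (0, -1), (0, 1)):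
--         mask = [[mask[r][c] and grid[r + dr][c + dc] == grid[r][c]
--                  for c in range(w)] for r in range(h)]
--     # copy the grid and blank the still-marked cells
--     return [[bg if c < w and mask[r][c] else v for c, v in enumerate(row)]
--             for r, row in enumerate(grid)]
-- ===== Notes on version B (the rewrite author's own statement) =====
-- stated objective: alternative
-- what changed: A decides each interior cell in one nested loop with an inline all() over a generator of the four neighbours; B instead builds a boolean candidate mask, erodes it in four separate whole-grid directional passes (one shifted comparison per direction), and finally blanks the surviving cells into a copy of the grid.
import Mathlib
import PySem

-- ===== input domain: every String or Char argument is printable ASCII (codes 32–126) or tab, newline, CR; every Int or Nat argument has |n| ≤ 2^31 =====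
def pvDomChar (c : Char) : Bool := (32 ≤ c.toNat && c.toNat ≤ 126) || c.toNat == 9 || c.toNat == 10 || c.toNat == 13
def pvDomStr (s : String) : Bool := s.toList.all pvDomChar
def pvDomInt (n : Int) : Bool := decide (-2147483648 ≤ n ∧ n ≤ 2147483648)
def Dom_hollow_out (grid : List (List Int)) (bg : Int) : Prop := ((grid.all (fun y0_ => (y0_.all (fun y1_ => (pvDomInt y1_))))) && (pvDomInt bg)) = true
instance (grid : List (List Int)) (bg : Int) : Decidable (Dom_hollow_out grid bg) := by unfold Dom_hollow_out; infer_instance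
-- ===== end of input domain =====

-- B replaces A's single nested interior loop (inline all() over the four neighbours) by a candidate
-- mask eroded in four separate directional passes; same cost, different decomposition (objective: alternative).
-- Neither program mutates its argument; the equivalence is about the return value.

-- ===== PORT A =====
-- literal port of A: copy the grid, then a nested loop over the interior mutating result[r][c];
-- r = r1 + 1 and c = c1 + 1 translate range(1, h-1) / range(1, w-1), so grid[r-1] is grid.getD r1,
-- grid[r+1] is grid.getD (r1+2), etc.
def hollow_out (grid : List (List Int)) (bg : Int) : List (List Int) :=
  if grid.length < 3 then grid
  else
    (List.range (grid.length - 2)).foldl (fun res r1 =>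
      (List.range ((grid.getD 0 []).length - 2)).foldl (fun res c1 =>
        if (grid.getD (r1 + 1) []).getD (c1 + 1) 0 ≠ bg ∧
            (grid.getD r1 []).getD (c1 + 1) 0 = (grid.getD (r1 + 1) []).getD (c1 + 1) 0 ∧
            (grid.getD (r1 + 2) []).getD (c1 + 1) 0 = (grid.getD (r1 + 1) []).getD (c1 + 1) 0 ∧
            (grid.getD (r1 + 1) []).getD c1 0 = (grid.getD (r1 + 1) []).getD (c1 + 1) 0 ∧
            (grid.getD (r1 + 1) []).getD (c1 + 2) 0 = (grid.getD (r1 + 1) []).getD (c1 + 1) 0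
        then res.set (r1 + 1) ((res.getD (r1 + 1) []).set (c1 + 1) bg) else res) res) grid

-- ===== PORT B =====
-- literal port of B (Source B): candidate mask, four directional erosion passes (fold over the literal
-- direction list rebuilding the mask), then copy-and-blank via enumerate.  Python's short-circuit
-- `and` guards grid[r+dr]; here the index is total via `.toNat`/getD and the guard bit makes the
-- value irrelevant in exactly the same cases.
def hollow_out_alt (grid : List (List Int)) (bg : Int) : List (List Int) :=
  if grid.length < 3 then grid
  else
    (PySem.List.enumerate grid 0).map (fun p =>
      (PySem.List.enumerate p.2 0).map (fun q =>
        if q.1 < (((grid.getD 0 []).length : Nat) : Int) ∧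
            ((([((-1 : Int), (0 : Int)), (1, 0), (0, -1), (0, 1)].foldl (fun m d =>
                (List.range grid.length).map (fun r =>
                  (List.range (grid.getD 0 []).length).map (fun c =>
                    (m.getD r []).getD c false &&
                      ((grid.getD ((r : Int) + d.1).toNat []).getD ((c : Int) + d.2).toNat 0 ==
                        (grid.getD r []).getD c 0))))
              ((List.range grid.length).map (fun r =>
                (List.range (grid.getD 0 []).length).map (fun c =>
                  decide (0 < r) && decide (r < grid.length - 1) && decide (0 < c) &&
                    decide (c < (grid.getD 0 []).length - 1) &&
                    ((grid.getD r []).getD c 0 != bg))))).getD p.1.toNat []).getD q.1.toNat false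
              = true)
        then bg else q.2))

-- ===== PRECONDITION & SPEC =====
-- Pre_ excludes ragged grids (some row shorter than the first row) when the grid has ≥ 3 rows and
-- ≥ 3 columns: there A's unguarded reads grid[r][c] generally raise IndexError (only value-dependent
-- coincidences let it return, e.g. the cite in claim.json, where B agrees with A anyway).
def Pre_hollow_out (grid : List (List Int)) (bg : Int) : Prop :=
  grid.length < 3 ∨ (grid.getD 0 []).length < 3 ∨
    ∀ row ∈ grid, (grid.getD 0 []).length ≤ row.length
instance (grid : List (List Int)) (bg : Int) : Decidable (Pre_hollow_out grid bg) := by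
  unfold Pre_hollow_out; infer_instance

def pvWitness_hollow_out : List (List Int) × Int := ([[1, 1, 1], [1, 2, 1], [1, 1, 1]], 0)

def Spec_hollow_out (grid : List (List Int)) (bg : Int) (out : List (List Int)) : Prop := out = hollow_out_alt grid bg
instance (grid : List (List Int)) (bg : Int) (out : List (List Int)) : Decidable (Spec_hollow_out grid bg out) := by unfold Spec_hollow_out; infer_instance

-- ===== CLAIM (what is proved, stated in full; the proofs are below) =====
def Claim_equal_hollow_out : Prop := ∀ (grid : List (List Int)) (bg : Int), Dom_hollow_out grid bg → Pre_hollow_out grid bg → Spec_hollow_out grid bg (hollow_out grid bg)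

-- ===== LEMMAS AND PROOFS =====

-- A's inner-loop guard at outer index r1, inner index c1 (cell (r1+1, c1+1))
abbrev pvGA (grid : List (List Int)) (bg : Int) (r1 c1 : Nat) : Prop :=
  (grid.getD (r1 + 1) []).getD (c1 + 1) 0 ≠ bg ∧
    (grid.getD r1 []).getD (c1 + 1) 0 = (grid.getD (r1 + 1) []).getD (c1 + 1) 0 ∧
    (grid.getD (r1 + 2) []).getD (c1 + 1) 0 = (grid.getD (r1 + 1) []).getD (c1 + 1) 0 ∧
    (grid.getD (r1 + 1) []).getD c1 0 = (grid.getD (r1 + 1) []).getD (c1 + 1) 0 ∧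
    (grid.getD (r1 + 1) []).getD (c1 + 2) 0 = (grid.getD (r1 + 1) []).getD (c1 + 1) 0

-- length of the 1-D conditional-set fold
lemma pvRowLen (p : Nat → Prop) [DecidablePred p] (bg : Int) (row0 : List Int) (m : Nat) :
    ((List.range m).foldl (fun row c1 => if p c1 then row.set (c1 + 1) bg else row) row0).length
      = row0.length := by
  induction m with
  | zero => rfl
  | succ n ih =>
    rw [List.range_succ, List.foldl_append]
    simp only [List.foldl_cons, List.foldl_nil]
    split_ifs <;> simp [ih]

-- pointwise value of the 1-D conditional-set fold
lemma pvRowChar (p : Nat → Prop) [DecidablePred p] (bg : Int) (row0 : List Int) (m j : Nat) :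
    ((List.range m).foldl (fun row c1 => if p c1 then row.set (c1 + 1) bg else row) row0)[j]?
      = if 1 ≤ j ∧ j - 1 < m ∧ p (j - 1) then (row0[j]?).map (fun _ => bg) else row0[j]? := by
  induction m with
  | zero =>
    simp only [List.range_zero, List.foldl_nil]
    rw [if_neg (by omega)]
  | succ n ih =>
    rw [List.range_succ, List.foldl_append]
    simp only [List.foldl_cons, List.foldl_nil]
    by_cases hp : p n
    · rw [if_pos hp, List.getElem?_set, pvRowLen]
      by_cases hj : n + 1 = j
      · subst hj
        rw [if_pos rfl]
        by_cases hl : n + 1 < row0.length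
        · rw [if_pos hl, if_pos (show 1 ≤ n + 1 ∧ n + 1 - 1 < n + 1 ∧ p (n + 1 - 1) from
            ⟨by omega, by omega, by simpa using hp⟩), List.getElem?_eq_getElem hl]
          rfl
        · rw [if_neg hl, if_pos (show 1 ≤ n + 1 ∧ n + 1 - 1 < n + 1 ∧ p (n + 1 - 1) from
            ⟨by omega, by omega, by simpa using hp⟩), List.getElem?_eq_none (by omega)]
          rfl
      · rw [if_neg hj, ih]
        have heq : (1 ≤ j ∧ j - 1 < n ∧ p (j - 1)) ↔ (1 ≤ j ∧ j - 1 < n + 1 ∧ p (j - 1)) := by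
          constructor
          · rintro ⟨h1, h2, h3⟩; exact ⟨h1, by omega, h3⟩
          · rintro ⟨h1, h2, h3⟩; exact ⟨h1, by omega, h3⟩
        rw [if_congr heq rfl rfl]
    · rw [if_neg hp, ih]
      have heq : (1 ≤ j ∧ j - 1 < n ∧ p (j - 1)) ↔ (1 ≤ j ∧ j - 1 < n + 1 ∧ p (j - 1)) := by
        constructor
        · rintro ⟨h1, h2, h3⟩; exact ⟨h1, by omega, h3⟩
        · rintro ⟨h1, h2, h3⟩
          have hne : j - 1 ≠ n := fun h => hp (h ▸ h3)
          exact ⟨h1, by omega, h3⟩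
      rw [if_congr heq rfl rfl]

-- the inner fold only rewrites row r: it is res.set r (row-level fold)
lemma pvInnerSet (r : Nat) (bg : Int) (p : Nat → Prop) [DecidablePred p]
    (res : List (List Int)) (m : Nat) (hr : r < res.length) :
    (List.range m).foldl
        (fun res c1 => if p c1 then res.set r ((res.getD r []).set (c1 + 1) bg) else res) res
      = res.set r ((List.range m).foldl
          (fun row c1 => if p c1 then row.set (c1 + 1) bg else row) (res.getD r [])) := by
  induction m with
  | zero =>
    simp only [List.range_zero, List.foldl_nil]
    rw [List.getD_eq_getElem?_getD, List.getElem?_eq_getElem hr]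
    exact (List.set_getElem_self hr).symm
  | succ n ih =>
    rw [List.range_succ, List.foldl_append, List.foldl_append]
    simp only [List.foldl_cons, List.foldl_nil]
    rw [ih]
    have hget : ∀ X : List Int, ((res.set r X).getD r []) = X := by
      intro X
      rw [List.getD_eq_getElem?_getD, List.getElem?_set]
      simp [hr]
    by_cases hp : p n
    · rw [if_pos hp, if_pos hp, hget, List.set_set]
    · rw [if_neg hp, if_neg hp]

-- length of the inner conditional-set fold over the result grid
lemma pvInnerLen (r : Nat) (bg : Int) (p : Nat → Prop) [DecidablePred p]
    (res : List (List Int)) (m : Nat) :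
    ((List.range m).foldl
        (fun res c1 => if p c1 then res.set r ((res.getD r []).set (c1 + 1) bg) else res) res).length
      = res.length := by
  induction m with
  | zero => rfl
  | succ n ih =>
    rw [List.range_succ, List.foldl_append]
    simp only [List.foldl_cons, List.foldl_nil]
    split_ifs
    · rw [List.length_set, ih]
    · rw [ih]

-- foldl congruence under a state invariant
lemma pvFoldlCongrInv {α β : Type} (l : List β) (f g : α → β → α) (P : α → Prop) (a : α)
    (ha : P a) (hP : ∀ x b, P x → P (f x b)) (hfg : ∀ x b, P x → b ∈ l → f x b = g x b) :
    l.foldl f a = l.foldl g a := by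
  induction l generalizing a with
  | nil => rfl
  | cons b t ih =>
    simp only [List.foldl_cons]
    rw [← hfg a b ha (List.mem_cons_self)]
    exact ih (f a b) (hP a b ha) (fun x b' hx hb' => hfg x b' hx (List.mem_cons_of_mem _ hb'))

-- length of the row-replacing outer fold
lemma pvOuterLen (T : Nat → List Int → List Int) (res0 : List (List Int)) (m : Nat) :
    ((List.range m).foldl (fun res r1 => res.set (r1 + 1) (T r1 (res.getD (r1 + 1) []))) res0).length
      = res0.length := by
  induction m with
  | zero => rfl
  | succ n ih =>
    rw [List.range_succ, List.foldl_append]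
    simp only [List.foldl_cons, List.foldl_nil]
    rw [List.length_set, ih]

-- pointwise value of the row-replacing outer fold
lemma pvOuterChar (T : Nat → List Int → List Int) (res0 : List (List Int)) (m j : Nat) :
    ((List.range m).foldl (fun res r1 => res.set (r1 + 1) (T r1 (res.getD (r1 + 1) []))) res0)[j]?
      = if 1 ≤ j ∧ j - 1 < m then (res0[j]?).map (T (j - 1)) else res0[j]? := by
  induction m with
  | zero =>
    simp only [List.range_zero, List.foldl_nil]
    rw [if_neg (by omega)]
  | succ n ih =>
    rw [List.range_succ, List.foldl_append]
    simp only [List.foldl_cons, List.foldl_nil]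
    by_cases hj : n + 1 = j
    · subst hj
      rw [List.getElem?_set, if_pos rfl, pvOuterLen, List.getD_eq_getElem?_getD, ih,
        if_neg (show ¬(1 ≤ n + 1 ∧ n + 1 - 1 < n) by omega),
        if_pos (show 1 ≤ n + 1 ∧ n + 1 - 1 < n + 1 from ⟨by omega, by omega⟩)]
      by_cases hl : n + 1 < res0.length
      · rw [if_pos hl, List.getElem?_eq_getElem hl]
        rfl
      · rw [if_neg hl, List.getElem?_eq_none (by omega)]
        rfl
    · rw [List.getElem?_set, if_neg hj, ih]
      have heq : (1 ≤ j ∧ j - 1 < n) ↔ (1 ≤ j ∧ j - 1 < n + 1) := by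
        constructor
        · rintro ⟨h1, h2⟩; exact ⟨h1, by omega⟩
        · rintro ⟨h1, h2⟩; exact ⟨h1, by omega⟩
      rw [if_congr heq rfl rfl]

-- A as a row-replacing fold
lemma pvAEq (grid : List (List Int)) (bg : Int) (h3 : ¬ grid.length < 3) :
    hollow_out grid bg
      = (List.range (grid.length - 2)).foldl
          (fun res r1 => res.set (r1 + 1)
            ((List.range ((grid.getD 0 []).length - 2)).foldl
              (fun row c1 => if pvGA grid bg r1 c1 then row.set (c1 + 1) bg else row)
              (res.getD (r1 + 1) []))) grid := by
  unfold hollow_out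
  rw [if_neg h3]
  refine pvFoldlCongrInv _ _ _ (fun res => res.length = grid.length) _ rfl ?_ ?_
  · intro x b hx
    exact (pvInnerLen (b + 1) bg (pvGA grid bg b) x _).trans hx
  · intro x b hx hb
    have hb' : b < grid.length - 2 := List.mem_range.mp hb
    have hr : b + 1 < x.length := by omega
    exact pvInnerSet (b + 1) bg (pvGA grid bg b) x _ hr

-- B's initial candidate mask, one directional erosion pass, and the four-pass mask
abbrev pvMask0 (grid : List (List Int)) (bg : Int) : List (List Bool) :=
  (List.range grid.length).map (fun r =>
    (List.range (grid.getD 0 []).length).map (fun c =>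
      decide (0 < r) && decide (r < grid.length - 1) && decide (0 < c) &&
        decide (c < (grid.getD 0 []).length - 1) && ((grid.getD r []).getD c 0 != bg)))

abbrev pvStep (grid : List (List Int)) (m : List (List Bool)) (d : Int × Int) : List (List Bool) :=
  (List.range grid.length).map (fun r =>
    (List.range (grid.getD 0 []).length).map (fun c =>
      (m.getD r []).getD c false &&
        ((grid.getD ((r : Int) + d.1).toNat []).getD ((c : Int) + d.2).toNat 0 ==
          (grid.getD r []).getD c 0)))

abbrev pvMask (grid : List (List Int)) (bg : Int) : List (List Bool) :=
  [((-1 : Int), (0 : Int)), (1, 0), (0, -1), (0, 1)].foldl (pvStep grid) (pvMask0 grid bg)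

lemma pvBEq (grid : List (List Int)) (bg : Int) (h3 : ¬ grid.length < 3) :
    hollow_out_alt grid bg
      = (PySem.List.enumerate grid 0).map (fun p =>
          (PySem.List.enumerate p.2 0).map (fun q =>
            if q.1 < (((grid.getD 0 []).length : Nat) : Int) ∧
                (((pvMask grid bg).getD p.1.toNat []).getD q.1.toNat false) = true
            then bg else q.2)) := by
  unfold hollow_out_alt
  rw [if_neg h3]

lemma pvMask0Get (grid : List (List Int)) (bg : Int) (r c : Nat)
    (hr : r < grid.length) (hc : c < (grid.getD 0 []).length) :
    ((pvMask0 grid bg).getD r []).getD c false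
      = (decide (0 < r) && decide (r < grid.length - 1) && decide (0 < c) &&
          decide (c < (grid.getD 0 []).length - 1) && ((grid.getD r []).getD c 0 != bg)) := by
  rw [PySem.List.getD_map_range _ _ _ _ hr, PySem.List.getD_map_range _ _ _ _ hc]

lemma pvStepGet (grid : List (List Int)) (m : List (List Bool)) (d : Int × Int) (r c : Nat)
    (hr : r < grid.length) (hc : c < (grid.getD 0 []).length) :
    ((pvStep grid m d).getD r []).getD c false
      = ((m.getD r []).getD c false &&
          ((grid.getD ((r : Int) + d.1).toNat []).getD ((c : Int) + d.2).toNat 0 ==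
            (grid.getD r []).getD c 0)) := by
  rw [PySem.List.getD_map_range _ _ _ _ hr, PySem.List.getD_map_range _ _ _ _ hc]

-- the four-pass mask holds at (r, c) exactly when (r, c) is an interior non-background cell all
-- four of whose neighbours carry its own value (A's guard at outer offsets r-1, c-1)
lemma pvMaskGet (grid : List (List Int)) (bg : Int) (r c : Nat)
    (hr : r < grid.length) (hc : c < (grid.getD 0 []).length) :
    (((pvMask grid bg).getD r []).getD c false = true)
      ↔ (0 < r ∧ r < grid.length - 1 ∧ 0 < c ∧ c < (grid.getD 0 []).length - 1 ∧
          pvGA grid bg (r - 1) (c - 1)) := by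
  show ((([((-1 : Int), (0 : Int)), (1, 0), (0, -1), (0, 1)].foldl (pvStep grid)
      (pvMask0 grid bg)).getD r []).getD c false = true) ↔ _
  simp only [List.foldl_cons, List.foldl_nil]
  rw [pvStepGet _ _ _ _ _ hr hc, pvStepGet _ _ _ _ _ hr hc, pvStepGet _ _ _ _ _ hr hc,
    pvStepGet _ _ _ _ _ hr hc, pvMask0Get _ _ _ _ hr hc]
  simp only [Bool.and_eq_true, decide_eq_true_eq, bne_iff_ne, beq_iff_eq, ne_eq]
  constructor
  · rintro ⟨⟨⟨⟨⟨⟨⟨⟨h1, h2⟩, h3⟩, h4⟩, h5⟩, q1⟩, q2⟩, q3⟩, q4⟩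
    have t0 : ((r : Int) + 0).toNat = r := by omega
    have t1 : ((r : Int) + -1).toNat = r - 1 := by omega
    have t2 : ((r : Int) + 1).toNat = r + 1 := by omega
    have t3 : ((c : Int) + 0).toNat = c := by omega
    have t4 : ((c : Int) + -1).toNat = c - 1 := by omega
    have t5 : ((c : Int) + 1).toNat = c + 1 := by omega
    rw [t1, t3] at q1
    rw [t2, t3] at q2
    rw [t0, t4] at q3
    rw [t0, t5] at q4
    simp only [pvGA, ne_eq]
    rw [show r - 1 + 1 = r from by omega, show r - 1 + 2 = r + 1 from by omega,
      show c - 1 + 1 = c from by omega, show c - 1 + 2 = c + 1 from by omega]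
    exact ⟨h1, h2, h3, h4, h5, q1, q2, q3, q4⟩
  · rintro ⟨h1, h2, h3, h4, hga⟩
    simp only [pvGA, ne_eq] at hga
    rw [show r - 1 + 1 = r from by omega, show r - 1 + 2 = r + 1 from by omega,
      show c - 1 + 1 = c from by omega, show c - 1 + 2 = c + 1 from by omega] at hga
    obtain ⟨g5, g1, g2, g3, g4⟩ := hga
    have t0 : ((r : Int) + 0).toNat = r := by omega
    have t1 : ((r : Int) + -1).toNat = r - 1 := by omega
    have t2 : ((r : Int) + 1).toNat = r + 1 := by omega
    have t3 : ((c : Int) + 0).toNat = c := by omega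
    have t4 : ((c : Int) + -1).toNat = c - 1 := by omega
    have t5 : ((c : Int) + 1).toNat = c + 1 := by omega
    rw [t0, t1, t2, t3, t4, t5]
    exact ⟨⟨⟨⟨⟨⟨⟨⟨h1, h2⟩, h3⟩, h4⟩, g5⟩, g1⟩, g2⟩, g3⟩, g4⟩

-- ===== VERDICT (by name: the statement is the Claim_ definition above) =====
theorem hollow_out_spec : Claim_equal_hollow_out := by
  intro grid bg _ _
  unfold Spec_hollow_out
  by_cases h3 : grid.length < 3
  · unfold hollow_out hollow_out_alt
    rw [if_pos h3, if_pos h3]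
  · have hlen3 : 3 ≤ grid.length := by omega
    rw [pvAEq grid bg h3, pvBEq grid bg h3]
    apply List.ext_getElem?
    intro r
    rw [pvOuterChar (fun r1 row => (List.range ((grid.getD 0 []).length - 2)).foldl
        (fun row c1 => if pvGA grid bg r1 c1 then row.set (c1 + 1) bg else row) row)
      grid (grid.length - 2) r, List.getElem?_map, PySem.List.getElem?_enumerate]
    cases hrow : grid[r]? with
    | none => simp
    | some row =>
      have hr : r < grid.length := by
        by_contra hcon
        rw [List.getElem?_eq_none (by omega)] at hrow
        simp at hrow
      simp only [Option.map_some, zero_add, Int.toNat_natCast]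
      rw [← apply_ite some]
      simp only [Option.some.injEq]
      apply List.ext_getElem?
      intro j
      rw [apply_ite (fun l : List Int => l[j]?), pvRowChar, List.getElem?_map,
        PySem.List.getElem?_enumerate]
      cases hv : row[j]? with
      | none => simp
      | some v =>
        simp only [Option.map_some, zero_add, Int.toNat_natCast]
        rw [apply_ite some]
        by_cases hj : j < (grid.getD 0 []).length
        · have hm := pvMaskGet grid bg r j hr hj
          by_cases hP : 1 ≤ r ∧ r - 1 < grid.length - 2
          · rw [if_pos hP]
            split_ifs with c1 c2 c3
            · rfl
            · exfalso
              obtain ⟨j1, j2, jga⟩ := c1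
              obtain ⟨hP1, hP2⟩ := hP
              exact c2 ⟨by exact_mod_cast hj,
                hm.mpr ⟨by omega, by omega, by omega, by omega, jga⟩⟩
            · exfalso
              obtain ⟨hjint, hmask⟩ := c3
              obtain ⟨m1, m2, m3, m4, mga⟩ := hm.mp hmask
              exact c1 ⟨by omega, by omega, mga⟩
            · rfl
          · rw [if_neg hP]
            have hc : ¬((j : Int) < (((grid.getD 0 []).length : Nat) : Int) ∧
                ((pvMask grid bg).getD r []).getD j false = true) := by
              rintro ⟨-, hmask⟩
              obtain ⟨m1, m2, -, -, -⟩ := hm.mp hmask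
              exact hP ⟨by omega, by omega⟩
            rw [if_neg hc]
        · have hc : ¬((j : Int) < (((grid.getD 0 []).length : Nat) : Int) ∧
              ((pvMask grid bg).getD r []).getD j false = true) := by
            rintro ⟨hji, -⟩
            exact hj (by exact_mod_cast hji)
          have hC1 : ¬(1 ≤ j ∧ j - 1 < (grid.getD 0 []).length - 2 ∧
              pvGA grid bg (r - 1) (j - 1)) := by
            rintro ⟨a, b, -⟩
            exact hj (by omega)
          rw [if_neg hc, if_neg hC1, ite_self]
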